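-- pv_equiv track=rewrite | github.com/Golfplan18/local-ai | orchestrator/tools/extraction_engine.py | _parse_relationships
-- ===== SOURCE A (Python) =====
-- def _parse_relationships(text: str) -> list[dict]:
--     """Parse relationship entries from a block."""
--     relationships = []
--     current = {}
--
--     for line in text.strip().split('\n'):
--         line = line.strip()
--         if line.startswith('- type:'):
--             if current:
--                 relationships.append(current)
--             current = {"type": line.split(':', 1)[1].strip().strip('"\'') }
--         elif line.startswith('target:'):
--             current["target"] = line.split(':', 1)[1].strip().strip('"\'')
--         elif line.startswith('confidence:'):
--             current["confidence"] = line.split(':', 1)[1].strip().strip('"\'')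
--
--     if current:
--         relationships.append(current)
--
--     return relationships
-- ===== SOURCE B (Python) =====
-- def _parse_relationships(text: str) -> list[dict]:
--     """Parse relationship entries from a block (segment-split decomposition)."""
--     lines = [ln.strip() for ln in text.strip().split('\n')]
--
--     # Pass 1: split into segments; a new segment starts at each '- type:' line,
--     # lines before the first marker form a leading preamble segment.
--     segments = []
--     seg = []
--     for ln in lines:
--         if ln.startswith('- type:'):
--             segments.append(seg)
--             seg = [ln]
--         else:
--             seg.append(ln)
--     segments.append(seg)
--
--     def value(ln):
--         return ln.split(':', 1)[1].strip().strip('"\'')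
--
--     # Pass 2: map each segment to a dict, dropping empty ones.
--     out = []
--     for seg in segments:
--         d = {}
--         rest = seg
--         if seg and seg[0].startswith('- type:'):
--             d['type'] = value(seg[0])
--             rest = seg[1:]
--         for ln in rest:
--             if ln.startswith('target:'):
--                 d['target'] = value(ln)
--             elif ln.startswith('confidence:'):
--                 d['confidence'] = value(ln)
--         if d:
--             out.append(d)
--     return out
-- ===== Notes on version B (the rewrite author's own statement) =====
-- stated objective: alternative
-- what changed: Replaced A's single stateful loop carrying an open dict across iterations by a two-pass decomposition: first split the stripped lines into segments at the type-marker lines (with a leading preamble segment), then map each segment independently to its dict and drop empty ones.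
import Mathlib
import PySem

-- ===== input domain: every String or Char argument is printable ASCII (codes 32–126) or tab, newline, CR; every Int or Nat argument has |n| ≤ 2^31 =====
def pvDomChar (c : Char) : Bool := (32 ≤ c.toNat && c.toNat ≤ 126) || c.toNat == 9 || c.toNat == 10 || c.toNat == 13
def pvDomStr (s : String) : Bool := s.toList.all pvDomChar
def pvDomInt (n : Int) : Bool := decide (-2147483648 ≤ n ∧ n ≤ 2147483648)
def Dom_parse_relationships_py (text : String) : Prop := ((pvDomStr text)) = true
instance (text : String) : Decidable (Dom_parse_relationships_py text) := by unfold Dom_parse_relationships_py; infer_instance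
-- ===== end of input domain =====

-- B replaces A's single stateful loop by a two-pass decomposition (split into '- type:' segments,
-- then map each segment to its dict); objective: alternative, same cost.

-- ===== PORT A =====
-- line.split(':', 1)[1].strip().strip('"\'')  — the '[1]' is exact here: every call site
-- has ':' in the line (the startswith guard), so the split has ≥ 2 pieces.
def pvVal (line : String) : String :=
  PySem.Str.stripChars
    (PySem.Str.strip (((PySem.Str.splitMax? line ":" 1).getD []).getD 1 "")) "\"'"

-- the loop body on an already-stripped line
def pvStepA' (st : List (PySem.Dict String String) × PySem.Dict String String) (line : String) :
    List (PySem.Dict String String) × PySem.Dict String String :=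
  if PySem.Str.startswith line "- type:" then
    ((if st.2.items = [] then st.1 else st.1 ++ [st.2]),
      PySem.Dict.ofList [("type", pvVal line)])
  else if PySem.Str.startswith line "target:" then
    (st.1, st.2.insert "target" (pvVal line))
  else if PySem.Str.startswith line "confidence:" then
    (st.1, st.2.insert "confidence" (pvVal line))
  else st

-- 'line = line.strip()' then the branches
def pvStepA (st : List (PySem.Dict String String) × PySem.Dict String String) (line0 : String) :
    List (PySem.Dict String String) × PySem.Dict String String :=
  pvStepA' st (PySem.Str.strip line0)

def parse_relationships_py (text : String) : List (List (String × String)) :=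
  let lines := (PySem.Str.split? (PySem.Str.strip text) "\n").getD []
  let st := lines.foldl pvStepA ([], PySem.Dict.empty)
  (if st.2.items = [] then st.1 else st.1 ++ [st.2]).map PySem.Dict.items

-- ===== PORT B =====
def pvApplyLine (d : PySem.Dict String String) (ln : String) : PySem.Dict String String :=
  if PySem.Str.startswith ln "target:" then d.insert "target" (pvVal ln)
  else if PySem.Str.startswith ln "confidence:" then d.insert "confidence" (pvVal ln)
  else d

-- pass 1 step: start a new segment at each '- type:' line
def pvStepB (st : List (List String) × List String) (ln : String) : List (List String) × List String :=
  if PySem.Str.startswith ln "- type:" then (st.1 ++ [st.2], [ln]) else (st.1, st.2 ++ [ln])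

-- pass 2: one segment to its dict
def pvSegDict (seg : List String) : PySem.Dict String String :=
  match seg with
  | ln :: rest =>
    if PySem.Str.startswith ln "- type:" then
      rest.foldl pvApplyLine (PySem.Dict.ofList [("type", pvVal ln)])
    else seg.foldl pvApplyLine PySem.Dict.empty
  | [] => PySem.Dict.empty

def parse_relationships_py_alt (text : String) : List (List (String × String)) :=
  let lines := ((PySem.Str.split? (PySem.Str.strip text) "\n").getD []).map PySem.Str.strip
  let st := lines.foldl pvStepB ([], [])
  (st.1 ++ [st.2]).filterMap (fun seg =>
    let d := pvSegDict seg
    if d.items = [] then none else some d.items)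

-- ===== PRECONDITION & SPEC =====
def Spec_parse_relationships_py (text : String) (out : List (List (String × String))) : Prop := out = parse_relationships_py_alt text
instance (text : String) (out : List (List (String × String))) : Decidable (Spec_parse_relationships_py text out) := by unfold Spec_parse_relationships_py; infer_instance

-- ===== CLAIM (what is proved, stated in full; the proofs are below) =====
def Claim_equal_parse_relationships_py : Prop := ∀ (text : String), Dom_parse_relationships_py text → Spec_parse_relationships_py text (parse_relationships_py text)

-- ===== LEMMAS AND PROOFS =====

-- the dicts emitted from an open dict `cur` by the remaining (stripped) lines
def pvEmit (cur : PySem.Dict String String) : List String → List (PySem.Dict String String)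
  | [] => if cur.items = [] then [] else [cur]
  | ln :: rest =>
    if PySem.Str.startswith ln "- type:" then
      (if cur.items = [] then [] else [cur]) ++
        pvEmit (PySem.Dict.ofList [("type", pvVal ln)]) rest
    else pvEmit (pvApplyLine cur ln) rest

theorem pvA_emit (ls : List String) :
    ∀ (rels : List (PySem.Dict String String)) (cur : PySem.Dict String String),
    (let st := ls.foldl pvStepA' (rels, cur);
      if st.2.items = [] then st.1 else st.1 ++ [st.2]) = rels ++ pvEmit cur ls := by
  induction ls with
  | nil =>
    intro rels cur
    simp only [List.foldl_nil, pvEmit]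
    by_cases hc : cur.items = [] <;> simp [hc]
  | cons ln rest ih =>
    intro rels cur
    simp only [List.foldl_cons, pvEmit]
    by_cases ht : PySem.Str.startswith ln "- type:" = true
    · rw [if_pos ht]
      have hstep : pvStepA' (rels, cur) ln =
          ((if cur.items = [] then rels else rels ++ [cur]),
            PySem.Dict.ofList [("type", pvVal ln)]) := by
        unfold pvStepA'; rw [if_pos ht]
      rw [hstep, ih]
      by_cases hc : cur.items = [] <;> simp [hc]
    · rw [if_neg ht]
      have hstep : pvStepA' (rels, cur) ln = (rels, pvApplyLine cur ln) := by
        unfold pvStepA' pvApplyLine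
        rw [if_neg ht]
        by_cases h2 : PySem.Str.startswith ln "target:" = true
        · rw [if_pos h2, if_pos h2]
        · rw [if_neg h2, if_neg h2]
          by_cases h3 : PySem.Str.startswith ln "confidence:" = true
          · rw [if_pos h3, if_pos h3]
          · rw [if_neg h3, if_neg h3]
      rw [hstep, ih]

def pvF (seg : List String) : Option (List (String × String)) :=
  if (pvSegDict seg).items = [] then none else some (pvSegDict seg).items

theorem pvSegDict_snoc (seg : List String) (ln : String)
    (hne : ¬ PySem.Str.startswith ln "- type:" = true) :
    pvSegDict (seg ++ [ln]) = pvApplyLine (pvSegDict seg) ln := by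
  cases seg with
  | nil =>
    simp only [List.nil_append, pvSegDict]
    rw [if_neg hne]
    simp only [List.foldl_cons, List.foldl_nil]
  | cons l0 t =>
    simp only [List.cons_append, pvSegDict]
    by_cases h0 : PySem.Str.startswith l0 "- type:" = true
    · rw [if_pos h0, if_pos h0, List.foldl_append, List.foldl_cons, List.foldl_nil]
    · rw [if_neg h0, if_neg h0]
      simp only [List.foldl_cons, List.foldl_append, List.foldl_nil]

theorem pvB_emit (ls : List String) :
    ∀ (segs : List (List String)) (curseg : List String),
    (let st := ls.foldl pvStepB (segs, curseg);
      (st.1 ++ [st.2]).filterMap pvF)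
    = segs.filterMap pvF ++ (pvEmit (pvSegDict curseg) ls).map PySem.Dict.items := by
  induction ls with
  | nil =>
    intro segs curseg
    simp only [List.foldl_nil, pvEmit, List.filterMap_append]
    congr 1
    by_cases hc : (pvSegDict curseg).items = [] <;>
      simp [pvF, hc]
  | cons ln rest ih =>
    intro segs curseg
    simp only [List.foldl_cons, pvEmit]
    by_cases ht : PySem.Str.startswith ln "- type:" = true
    · have hstep : pvStepB (segs, curseg) ln = (segs ++ [curseg], [ln]) := by
        unfold pvStepB; rw [if_pos ht]
      rw [hstep, ih, if_pos ht]
      have h1 : pvSegDict [ln] = PySem.Dict.ofList [("type", pvVal ln)] := by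
        simp only [pvSegDict]
        rw [if_pos ht, List.foldl_nil]
      rw [h1, List.filterMap_append, List.map_append, List.append_assoc]
      congr 1
      by_cases hc : (pvSegDict curseg).items = [] <;>
        simp [pvF, hc]
    · have hstep : pvStepB (segs, curseg) ln = (segs, curseg ++ [ln]) := by
        unfold pvStepB; rw [if_neg ht]
      rw [hstep, ih, pvSegDict_snoc curseg ln ht, if_neg ht]

-- ===== VERDICT (by name: the statement is the Claim_ definition above) =====
theorem parse_relationships_py_spec : Claim_equal_parse_relationships_py := by
  intro text _
  unfold Spec_parse_relationships_py parse_relationships_py parse_relationships_py_alt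
  have hA : ∀ (ls : List String) (st : _),
      st = ls.foldl pvStepA ([], PySem.Dict.empty) →
      (if st.2.items = [] then st.1 else st.1 ++ [st.2]).map PySem.Dict.items
        = (pvEmit PySem.Dict.empty (ls.map PySem.Str.strip)).map PySem.Dict.items := by
    intro ls st hst
    have : ls.foldl pvStepA ([], PySem.Dict.empty)
        = (ls.map PySem.Str.strip).foldl pvStepA' ([], PySem.Dict.empty) := by
      rw [List.foldl_map]; rfl
    rw [hst, this]
    have := pvA_emit (ls.map PySem.Str.strip) [] PySem.Dict.empty
    simp only [List.nil_append] at this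
    rw [this]
  have hB : ∀ (ls : List String),
      (let st := ls.foldl pvStepB ([], []);
        (st.1 ++ [st.2]).filterMap pvF)
      = (pvEmit PySem.Dict.empty ls).map PySem.Dict.items := by
    intro ls
    have := pvB_emit ls [] []
    simpa [pvSegDict] using this
  simp only
  rw [hA _ _ rfl, ← hB]
  rfl
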